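-- pv_equiv track=rewrite | github.com/MeAwesome/Sudoku | Sudoku.py | position_converter
-- ===== SOURCE A (Python) =====
-- def position_converter(position, value):
--     positions = {}
--     squares = {}
--     row = 0
--     column = 0
--     small_square = 0
--     for x in range(0,81):
--         positions[x] = (row, column)
--         squares[x] = small_square
--         column += 1
--         if column == 3:
--             small_square += 1
--         elif column == 6:
--             small_square += 1
--         elif column == 9:
--             row += 1
--             column = 0
--             if row < 3:
--                 small_square = 0
--             elif row < 6:
--                 small_square = 3
--             elif row < 9:
--                 small_square = 6
--     for y in range(0,81):
--         if positions[y] == position: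
--             if value:
--                 return squares[y]
--             else:
--                 return y
-- ===== SOURCE B (Python) =====
-- def position_converter(position, value):
--     for row in range(9):
--         for col in range(9):
--             if (row, col) == position:
--                 if value:
--                     return (row // 3) * 3 + col // 3
--                 else:
--                     return row * 9 + col
--     return None
-- ===== Notes on version B (the rewrite author's own statement) =====
-- stated objective: simpler
-- what changed: B drops A's 81-step state machine that precomputes two dicts (index->cell, index->square) and the second 81-step scan; instead it directly searches row/col in a 9x9 nested loop and computes the answer in closed form from the loop variables (row*9+col or (row//3)*3+col//3).
import Mathlib
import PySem

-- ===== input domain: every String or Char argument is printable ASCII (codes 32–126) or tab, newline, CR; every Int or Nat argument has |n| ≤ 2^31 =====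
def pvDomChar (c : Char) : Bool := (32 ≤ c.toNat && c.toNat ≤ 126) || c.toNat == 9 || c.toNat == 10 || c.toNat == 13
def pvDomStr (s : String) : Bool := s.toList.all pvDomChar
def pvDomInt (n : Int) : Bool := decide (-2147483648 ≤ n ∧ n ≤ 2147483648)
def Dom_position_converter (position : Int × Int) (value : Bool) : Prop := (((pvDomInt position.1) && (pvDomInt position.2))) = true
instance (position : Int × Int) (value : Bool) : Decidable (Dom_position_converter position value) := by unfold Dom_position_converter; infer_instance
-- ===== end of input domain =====

-- B replaces A's two precomputed dicts and second scan with one nested 9x9 search computing the result in closed form from the loop variables (objective: simpler).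

-- ===== PORT A =====
-- loop body of A's first loop: state = (positions, squares, row, column, small_square)
def pcStep (s : PySem.Dict Int (Int × Int) × PySem.Dict Int Int × Int × Int × Int) (x : Int) :
    PySem.Dict Int (Int × Int) × PySem.Dict Int Int × Int × Int × Int :=
  let (positions, squares, row, column, small_square) := s
  let positions := positions.insert x (row, column)
  let squares := squares.insert x small_square
  let column := column + 1
  if column == 3 then (positions, squares, row, column, small_square + 1)
  else if column == 6 then (positions, squares, row, column, small_square + 1)
  else if column == 9 then
    let row := row + 1
    let column := 0
    let small_square := if row < 3 then 0 else if row < 6 then 3 else if row < 9 then 6 else small_square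
    (positions, squares, row, column, small_square)
  else (positions, squares, row, column, small_square)

-- A's second loop with its early returns; positions[y]/squares[y] always exist (keys 0..80), so getD is exact here
def pcScan (positions : PySem.Dict Int (Int × Int)) (squares : PySem.Dict Int Int)
    (position : Int × Int) (value : Bool) : List Int → Option Int
  | [] => none
  | y :: ys =>
    if positions.getD y (0, 0) == position then
      if value then some (squares.getD y 0) else some y
    else pcScan positions squares position value ys

def position_converter (position : Int × Int) (value : Bool) : Option Int :=
  let s := (PySem.List.pyRange 0 81 1).foldl pcStep (PySem.Dict.empty, PySem.Dict.empty, 0, 0, 0)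
  pcScan s.1 s.2.1 position value (PySem.List.pyRange 0 81 1)

-- ===== PORT B =====
def pcColLoop (position : Int × Int) (value : Bool) (row : Int) : List Int → Option Int
  | [] => none
  | col :: cols =>
    if (row, col) == position then
      some (if value then PySem.Int.floordiv row 3 * 3 + PySem.Int.floordiv col 3
            else row * 9 + col)
    else pcColLoop position value row cols

def pcRowLoop (position : Int × Int) (value : Bool) : List Int → Option Int
  | [] => none
  | row :: rows =>
    match pcColLoop position value row (PySem.List.pyRange 0 9 1) with
    | some v => some v
    | none => pcRowLoop position value rows

def position_converter_alt (position : Int × Int) (value : Bool) : Option Int :=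
  pcRowLoop position value (PySem.List.pyRange 0 9 1)

-- ===== PRECONDITION & SPEC =====
def Spec_position_converter (position : Int × Int) (value : Bool) (out : Option Int) : Prop := out = position_converter_alt position value
instance (position : Int × Int) (value : Bool) (out : Option Int) : Decidable (Spec_position_converter position value out) := by unfold Spec_position_converter; infer_instance

-- ===== CLAIM (what is proved, stated in full; the proofs are below) =====
def Claim_equal_position_converter : Prop := ∀ (position : Int × Int) (value : Bool), Dom_position_converter position value → Spec_position_converter position value (position_converter position value)

-- ===== LEMMAS AND PROOFS =====

-- common form both scans are reduced to: a single scan over (row, col) pairs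
def pcScanPairs (p : Int × Int) (v : Bool) : List (Int × Int) → Option Int
  | [] => none
  | q :: rest =>
    if q == p then
      some (if v then PySem.Int.floordiv q.1 3 * 3 + PySem.Int.floordiv q.2 3
            else q.1 * 9 + q.2)
    else pcScanPairs p v rest

theorem pcCol_bridge (p : Int × Int) (v : Bool) (r : Int) :
    ∀ (cols : List Int) (L : List (Int × Int)),
      pcScanPairs p v ((cols.map (fun c => (r, c))) ++ L) =
        (match pcColLoop p v r cols with
         | some x => some x
         | none => pcScanPairs p v L) := by
  intro cols
  induction cols with
  | nil => intro L; simp [pcColLoop]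
  | cons c cs ih =>
    intro L
    by_cases h : ((r, c) == p) = true
    · simp [pcColLoop, pcScanPairs, h]
    · simp only [Bool.not_eq_true] at h
      simp [pcColLoop, pcScanPairs, h, ih]

theorem pcRow_bridge (p : Int × Int) (v : Bool) :
    ∀ rows : List Int,
      pcRowLoop p v rows =
        pcScanPairs p v
          (rows.flatMap (fun r => (PySem.List.pyRange 0 9 1).map (fun c => (r, c)))) := by
  intro rows
  induction rows with
  | nil => rfl
  | cons r rs ih =>
    simp only [List.flatMap_cons, pcCol_bridge]
    simp only [pcRowLoop, ih]

theorem pcScan_bridge (p : Int × Int) (v : Bool)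
    (d1 : PySem.Dict Int (Int × Int)) (d2 : PySem.Dict Int Int) :
    ∀ (ys : List Int) (qs : List (Int × Int)),
      List.Forall₂
        (fun (y : Int) (q : Int × Int) =>
          d1.getD y (0, 0) = q ∧
          d2.getD y 0 = PySem.Int.floordiv q.1 3 * 3 + PySem.Int.floordiv q.2 3 ∧
          y = q.1 * 9 + q.2) ys qs →
      pcScan d1 d2 p v ys = pcScanPairs p v qs := by
  intro ys qs h
  induction h with
  | nil => rfl
  | cons hq _ ih =>
    obtain ⟨h1, h2, h3⟩ := hq
    cases v <;> simp [pcScan, pcScanPairs, h3, ih] <;> split <;> simp_all [h1, h2]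

-- ===== VERDICT (by name: the statement is the Claim_ definition above) =====
set_option maxRecDepth 100000 in
theorem position_converter_spec : Claim_equal_position_converter := by
  intro p v _
  unfold Spec_position_converter position_converter position_converter_alt
  rw [pcRow_bridge]
  exact pcScan_bridge p v _ _ _ _ (by decide)
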